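-- pv_equiv track=rewrite | github.com/wise-bit/advent-of-code | 2024/day15.py | transform_grid
-- ===== SOURCE A (Python) =====
-- def transform_grid(g):
--   new_g = []
--
--   for row in g:
--     new_g.append(
--       list(
--         "".join(row)
--         .replace("#", "##")
--         .replace("O", "[]")
--         .replace(".", "..")
--         .replace("@", "@.")
--       )
--     )
--
--   return new_g
-- ===== SOURCE B (Python) =====
-- MAPPING = {'#': '##', 'O': '[]', '.': '..', '@': '@.'}
--
--
-- def transform_grid(g):
--   new_g = []
--   for row in g:
--     out = []
--     for ch in "".join(row):
--       out.extend(MAPPING.get(ch, ch))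
--     new_g.append(out)
--   return new_g
-- ===== Notes on version B (the rewrite author's own statement) =====
-- stated objective: idiomatic
-- what changed: Replaces A's four sequential whole-string .replace scans (each rebuilding the string) with a single character-by-character pass that extends the output via a fixed expansion table MAPPING.get(ch, ch).
import Mathlib
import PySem

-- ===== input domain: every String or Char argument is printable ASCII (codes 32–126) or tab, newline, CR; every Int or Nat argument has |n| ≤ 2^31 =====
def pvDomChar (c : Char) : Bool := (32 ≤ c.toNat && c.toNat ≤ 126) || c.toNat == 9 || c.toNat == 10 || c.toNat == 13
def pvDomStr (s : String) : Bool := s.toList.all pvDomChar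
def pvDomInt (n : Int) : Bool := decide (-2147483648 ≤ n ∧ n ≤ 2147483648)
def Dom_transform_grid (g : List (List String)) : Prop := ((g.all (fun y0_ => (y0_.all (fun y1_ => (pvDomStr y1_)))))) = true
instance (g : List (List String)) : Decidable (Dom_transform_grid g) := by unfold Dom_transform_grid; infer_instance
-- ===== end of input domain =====

-- B replaces A's four sequential whole-string .replace scans with a single
-- character-by-character pass using a fixed expansion table (objective: idiomatic).

-- ===== PORT A =====
def transform_grid (g : List (List String)) : List (List String) :=
  g.map (fun row =>
    (PySem.Str.replace
      (PySem.Str.replace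
        (PySem.Str.replace
          (PySem.Str.replace (PySem.Str.join "" row) "#" "##")
          "O" "[]")
        "." "..")
      "@" "@.").toList.map (fun c => String.ofList [c]))

-- ===== PORT B =====
-- MAPPING = {'#': '##', 'O': '[]', '.': '..', '@': '@.'}
def pvMapping : PySem.Dict String String :=
  PySem.Dict.ofList [("#", "##"), ("O", "[]"), (".", ".."), ("@", "@.")]

def transform_grid_alt (g : List (List String)) : List (List String) :=
  g.map (fun row =>
    (PySem.Str.join "" row).toList.foldl
      (fun out c =>
        out ++ (pvMapping.getD (String.ofList [c]) (String.ofList [c])).toList.map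
          (fun d => String.ofList [d]))
      [])

-- ===== PRECONDITION & SPEC =====
def Spec_transform_grid (g : List (List String)) (out : List (List String)) : Prop := out = transform_grid_alt g
instance (g : List (List String)) (out : List (List String)) : Decidable (Spec_transform_grid g out) := by unfold Spec_transform_grid; infer_instance

-- ===== CLAIM (what is proved, stated in full; the proofs are below) =====
def Claim_equal_transform_grid : Prop := ∀ (g : List (List String)), Dom_transform_grid g → Spec_transform_grid g (transform_grid g)

-- ===== LEMMAS AND PROOFS =====

-- per-character expansion realised by the chain of replaces
def pvExpand (c : Char) : List Char :=
  if c = '#' then ['#', '#']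
  else if c = 'O' then ['[', ']']
  else if c = '.' then ['.', '.']
  else if c = '@' then ['@', '.']
  else [c]

theorem replace_go_single (o : Char) (new : List Char) :
    ∀ (l : List Char) (fuel : Nat) (acc : List Char), l.length ≤ fuel →
    PySem.Chars.replace.go [o] new fuel l acc =
      acc.reverse ++ l.flatMap (fun c => if c = o then new else [c]) := by
  intro l
  induction l with
  | nil =>
      intro fuel acc _
      cases fuel <;> simp [PySem.Chars.replace.go]
  | cons c t ih =>
      intro fuel acc hle
      cases fuel with
      | zero => simp at hle
      | succ fuel =>
        have ht : t.length ≤ fuel := by simpa using hle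
        by_cases hc : c = o
        · subst hc
          have hpre : List.isPrefixOf [c] (c :: t) = true := by
            simp [List.isPrefixOf]
          rw [PySem.Chars.replace.go]
          rw [if_pos hpre]
          rw [show List.drop [c].length (c :: t) = t from rfl]
          rw [ih _ _ ht]
          simp
        · have hpre : List.isPrefixOf [o] (c :: t) = false := by
            simp [List.isPrefixOf]
            exact fun h => (hc h.symm).elim
          rw [PySem.Chars.replace.go]
          rw [if_neg (by simp [hpre])]
          rw [ih _ _ ht]
          simp [hc]

theorem replace_single (s : List Char) (o : Char) (new : List Char) :
    PySem.Chars.replace s [o] new = s.flatMap (fun c => if c = o then new else [c]) := by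
  rw [PySem.Chars.replace]
  simp only [List.isEmpty_cons, if_false, Bool.false_eq_true]
  simpa using replace_go_single o new s s.length [] le_rfl

theorem chain_eq_expand (cs : List Char) :
    ((((cs.flatMap (fun c => if c = '#' then ['#', '#'] else [c])).flatMap
        (fun c => if c = 'O' then ['[', ']'] else [c])).flatMap
        (fun c => if c = '.' then ['.', '.'] else [c])).flatMap
        (fun c => if c = '@' then ['@', '.'] else [c])) = cs.flatMap pvExpand := by
  rw [List.flatMap_assoc, List.flatMap_assoc, List.flatMap_assoc]
  refine List.flatMap_congr (fun c _ => ?_)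
  unfold pvExpand
  split_ifs with h1 h2 h3 h4 <;> subst_vars <;> simp_all

theorem getD_mapping (c : Char) :
    pvMapping.getD (String.ofList [c]) (String.ofList [c]) = String.ofList (pvExpand c) := by
  have hm : pvMapping = PySem.Dict.mk [("#", "##"), ("O", "[]"), (".", ".."), ("@", "@.")] := by
    decide
  rw [hm]
  unfold pvExpand
  simp only [PySem.Dict.getD, PySem.Dict.get?_mk_cons, String.ext_iff]
  by_cases h1 : c = '#'
  · subst h1; decide
  by_cases h2 : c = 'O'
  · subst h2; decide
  by_cases h3 : c = '.'
  · subst h3; decide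
  by_cases h4 : c = '@'
  · subst h4; decide
  have k1 : (("#" : String) == String.ofList [c]) = false := by
    simp [String.ext_iff]; exact fun h => h1 h.symm
  have k2 : (("O" : String) == String.ofList [c]) = false := by
    simp [String.ext_iff]; exact fun h => h2 h.symm
  have k3 : (("." : String) == String.ofList [c]) = false := by
    simp [String.ext_iff]; exact fun h => h3 h.symm
  have k4 : (("@" : String) == String.ofList [c]) = false := by
    simp [String.ext_iff]; exact fun h => h4 h.symm
  simp [k1, k2, k3, k4, PySem.Dict.get?, h1, h2, h3, h4]

theorem row_eq (row : List String) :
    (PySem.Str.replace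
      (PySem.Str.replace
        (PySem.Str.replace
          (PySem.Str.replace (PySem.Str.join "" row) "#" "##")
          "O" "[]")
        "." "..")
      "@" "@.").toList.map (fun c => String.ofList [c]) =
    (PySem.Str.join "" row).toList.foldl
      (fun out c =>
        out ++ (pvMapping.getD (String.ofList [c]) (String.ofList [c])).toList.map
          (fun d => String.ofList [d]))
      [] := by
  rw [PySem.List.foldl_append_eq_flatMap]
  rw [List.nil_append]
  simp only [PySem.Str.replace, String.toList_ofList]
  rw [show ("#" : String).toList = ['#'] from rfl,
      show ("O" : String).toList = ['O'] from rfl,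
      show ("." : String).toList = ['.'] from rfl,
      show ("@" : String).toList = ['@'] from rfl]
  rw [show ("##" : String).toList = ['#', '#'] from rfl,
      show ("[]" : String).toList = ['[', ']'] from rfl,
      show (".." : String).toList = ['.', '.'] from rfl,
      show ("@." : String).toList = ['@', '.'] from rfl]
  rw [replace_single, replace_single, replace_single, replace_single]
  rw [chain_eq_expand, List.map_flatMap]
  refine List.flatMap_congr (fun c _ => ?_)
  rw [getD_mapping]
  simp

-- ===== VERDICT (by name: the statement is the Claim_ definition above) =====
theorem transform_grid_spec : Claim_equal_transform_grid := by
  intro g _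
  unfold Spec_transform_grid transform_grid transform_grid_alt
  exact List.map_congr_left (fun row _ => row_eq row)
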